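-- pv_equiv track=rewrite | github.com/coffeeisafruit/jv-matchmaker-platform | outreach/services.py | parse_enrichment_data
-- ===== SOURCE A (Python) =====
-- def parse_enrichment_data(data: dict) -> dict:
--     """
--     Parse and normalize enrichment data from Clay webhook.
--
--     Args:
--         data: Raw webhook payload
--
--     Returns:
--         Normalized enrichment data dictionary
--     """
--     enrichment = {}
--
--     # Map common Clay fields to our schema
--     field_mapping = {
--         'linkedin_url': ['linkedin_url', 'linkedinUrl', 'linkedin'],
--         'company_name': ['company_name', 'companyName', 'company'],
--         'job_title': ['job_title', 'jobTitle', 'title', 'position'],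
--         'location': ['location', 'city', 'geography'],
--         'company_size': ['company_size', 'companySize', 'employees'],
--         'industry': ['industry', 'sector'],
--         'website': ['website', 'website_url', 'companyWebsite'],
--         'twitter_handle': ['twitter', 'twitter_handle', 'twitterHandle'],
--         'recent_posts': ['recent_posts', 'recentPosts', 'posts'],
--         'bio': ['bio', 'summary', 'about'],
--         'skills': ['skills', 'expertise'],
--         'connections': ['connections', 'connectionCount'],
--         'company_description': ['company_description', 'companyDescription'],
--         'funding_stage': ['funding_stage', 'fundingStage', 'funding'],
--         'tech_stack': ['tech_stack', 'techStack', 'technologies'],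
--     }
--
--     for our_field, clay_fields in field_mapping.items():
--         for clay_field in clay_fields:
--             if clay_field in data and data[clay_field]:
--                 enrichment[our_field] = data[clay_field]
--                 break
--
--     # Include any additional fields from Clay
--     known_fields = set()
--     for fields in field_mapping.values():
--         known_fields.update(fields)
--
--     for key, value in data.items():
--         if key not in known_fields and value:
--             enrichment[f'clay_{key}'] = value
--
--     return enrichment
-- ===== SOURCE B (Python) =====
-- FIELD_MAPPING = {
--     'linkedin_url': ['linkedin_url', 'linkedinUrl', 'linkedin'],
--     'company_name': ['company_name', 'companyName', 'company'],
--     'job_title': ['job_title', 'jobTitle', 'title', 'position'],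
--     'location': ['location', 'city', 'geography'],
--     'company_size': ['company_size', 'companySize', 'employees'],
--     'industry': ['industry', 'sector'],
--     'website': ['website', 'website_url', 'companyWebsite'],
--     'twitter_handle': ['twitter', 'twitter_handle', 'twitterHandle'],
--     'recent_posts': ['recent_posts', 'recentPosts', 'posts'],
--     'bio': ['bio', 'summary', 'about'],
--     'skills': ['skills', 'expertise'],
--     'connections': ['connections', 'connectionCount'],
--     'company_description': ['company_description', 'companyDescription'],
--     'funding_stage': ['funding_stage', 'fundingStage', 'funding'],
--     'tech_stack': ['tech_stack', 'techStack', 'technologies'],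
-- }
--
-- # reverse lookup: clay alias -> (our_field, priority index); its keys are the known fields
-- REVERSE = {alias: (field, idx)
--            for field, aliases in FIELD_MAPPING.items()
--            for idx, alias in enumerate(aliases)}
--
--
-- def parse_enrichment_data(data: dict) -> dict:
--     """One pass over data: pick, per schema field, the alias with the lowest
--     priority index; unknown truthy keys become clay_* extras immediately."""
--     best = {}      # our_field -> (priority idx, value)
--     extras = []    # [(clay_key, value)] in data order
--     for key, value in data.items():
--         if not value:
--             continue
--         hit = REVERSE.get(key)
--         if hit is None:
--             extras.append(('clay_' + key, value))
--         else:
--             field, idx = hit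
--             cur = best.get(field)
--             if cur is None or idx < cur[0]:
--                 best[field] = (idx, value)
--     enrichment = {field: best[field][1] for field in FIELD_MAPPING if field in best}
--     enrichment.update(extras)
--     return enrichment
-- ===== Notes on version B (the rewrite author's own statement) =====
-- stated objective: alternative
-- what changed: Instead of A's 15 per-field scans over the alias lists (each probing the dict), B makes one pass over data.items() with a precomputed alias->(field, priority) reverse map, keeping per field the candidate with the lowest priority index and collecting unknown truthy keys as clay_* extras in the same pass.
import Mathlib
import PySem

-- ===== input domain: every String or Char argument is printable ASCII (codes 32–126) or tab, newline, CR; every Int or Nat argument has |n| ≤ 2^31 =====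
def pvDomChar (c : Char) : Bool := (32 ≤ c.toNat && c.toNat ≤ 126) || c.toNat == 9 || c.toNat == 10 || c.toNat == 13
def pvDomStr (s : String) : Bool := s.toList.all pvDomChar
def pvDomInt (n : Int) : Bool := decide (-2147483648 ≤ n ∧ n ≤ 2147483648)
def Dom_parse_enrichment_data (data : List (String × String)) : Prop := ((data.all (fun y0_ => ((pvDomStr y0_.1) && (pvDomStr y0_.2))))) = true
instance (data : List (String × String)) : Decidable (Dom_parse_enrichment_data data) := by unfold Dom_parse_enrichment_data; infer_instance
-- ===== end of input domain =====

-- B replaces A's 15 alias-scans against the dict by one pass over data.items() with a precomputed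
-- alias → (field, priority) reverse map, keeping the lowest-priority winner per field (objective: alternative).

-- the field_mapping literal shared by both programs
def pvFieldMapping : List (String × List String) :=
  [("linkedin_url", ["linkedin_url", "linkedinUrl", "linkedin"]),
   ("company_name", ["company_name", "companyName", "company"]),
   ("job_title", ["job_title", "jobTitle", "title", "position"]),
   ("location", ["location", "city", "geography"]),
   ("company_size", ["company_size", "companySize", "employees"]),
   ("industry", ["industry", "sector"]),
   ("website", ["website", "website_url", "companyWebsite"]),
   ("twitter_handle", ["twitter", "twitter_handle", "twitterHandle"]),
   ("recent_posts", ["recent_posts", "recentPosts", "posts"]),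
   ("bio", ["bio", "summary", "about"]),
   ("skills", ["skills", "expertise"]),
   ("connections", ["connections", "connectionCount"]),
   ("company_description", ["company_description", "companyDescription"]),
   ("funding_stage", ["funding_stage", "fundingStage", "funding"]),
   ("tech_stack", ["tech_stack", "techStack", "technologies"])]

-- f'clay_{key}': string concatenation done on the underlying char list (exact; Lean's String.append is kernel-opaque)
def pvClay (k : String) : String := String.ofList ('c' :: 'l' :: 'a' :: 'y' :: '_' :: k.toList)

-- ===== PORT A =====
-- A's inner 'for clay_field in clay_fields: if clay_field in data and data[clay_field]: …; break'
def pvA_inner (data : List (String × String)) (our : String) :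
    List String → PySem.Dict String String → PySem.Dict String String
  | [], e => e
  | c :: rest, e =>
    match (PySem.Dict.mk data).get? c with
    | some v => if v ≠ "" then e.insert our v else pvA_inner data our rest e
    | none => pvA_inner data our rest e

def parse_enrichment_data (data : List (String × String)) : List (String × String) :=
  let enrichment := pvFieldMapping.foldl (fun e p => pvA_inner data p.1 p.2 e) PySem.Dict.empty
  let known := pvFieldMapping.foldl (fun s p => PySem.Set.update s p.2) PySem.Set.empty
  let enrichment := data.foldl
    (fun e kv => if ¬ PySem.Set.contains known kv.1 ∧ kv.2 ≠ "" then e.insert (pvClay kv.1) kv.2 else e)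
    enrichment
  enrichment.items

-- ===== PORT B =====
-- B's module-level REVERSE = {alias: (field, idx) for field, aliases in FIELD_MAPPING.items() for idx, alias in enumerate(aliases)}
def pvReverse : List (String × (String × Int)) :=
  pvFieldMapping.flatMap (fun p => (PySem.List.enumerate p.2).map (fun q => (q.2, (p.1, q.1))))

-- one step of B's single loop over data.items()
def pvB_step (st : PySem.Dict String (Int × String) × List (String × String)) (kv : String × String) :
    PySem.Dict String (Int × String) × List (String × String) :=
  if kv.2 = "" then st
  else
    match (PySem.Dict.mk pvReverse).get? kv.1 with
    | none => (st.1, st.2 ++ [(pvClay kv.1, kv.2)])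
    | some q =>
      match st.1.get? q.1 with
      | none => (st.1.insert q.1 (q.2, kv.2), st.2)
      | some c => if q.2 < c.1 then (st.1.insert q.1 (q.2, kv.2), st.2) else st

def parse_enrichment_data_alt (data : List (String × String)) : List (String × String) :=
  let st := data.foldl pvB_step (PySem.Dict.empty, [])
  let enrichment := pvFieldMapping.foldl
    (fun e p => match st.1.get? p.1 with
      | some c => e.insert p.1 c.2
      | none => e) PySem.Dict.empty
  (PySem.Dict.update enrichment st.2).items

-- ===== PRECONDITION & SPEC =====
-- Pre_ excludes association lists with duplicate keys: they do not represent any Python dict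
-- (A's argument is a dict, in which keys are unique), so nothing is claimed there.
def Pre_parse_enrichment_data (data : List (String × String)) : Prop := (data.map Prod.fst).Nodup
instance (data : List (String × String)) : Decidable (Pre_parse_enrichment_data data) := by
  unfold Pre_parse_enrichment_data; infer_instance

def pvWitness_parse_enrichment_data : (List (String × String)) :=
  [("linkedin", "http://x"), ("company", "Acme"), ("foo", "bar"), ("sector", "")]

def Spec_parse_enrichment_data (data : List (String × String)) (out : List (String × String)) : Prop :=
  out = parse_enrichment_data_alt data
instance (data : List (String × String)) (out : List (String × String)) : Decidable (Spec_parse_enrichment_data data out) := by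
  unfold Spec_parse_enrichment_data; infer_instance

-- ===== CLAIM (what is proved, stated in full; the proofs are below) =====
def Claim_equal_parse_enrichment_data : Prop :=
  ∀ (data : List (String × String)), Dom_parse_enrichment_data data →
    Pre_parse_enrichment_data data →
    Spec_parse_enrichment_data data (parse_enrichment_data data)

-- ===== LEMMAS AND PROOFS =====

-- ---- proof-side vocabulary ----

-- A's winner for one alias list: the value of the first alias present in data with a truthy value
def pvWOpt (data : List (String × String)) : List String → Option String
  | [] => none
  | c :: rest =>
    match (PySem.Dict.mk data).get? c with
    | some v => if v ≠ "" then some v else pvWOpt data rest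
    | none => pvWOpt data rest

-- the same scan, also recording the alias's position (offset m)
def pvGo (data : List (String × String)) (m : Int) : List String → Option (Int × String)
  | [] => none
  | c :: rest =>
    match (PySem.Dict.mk data).get? c with
    | some v => if v ≠ "" then some (m, v) else pvGo data (m + 1) rest
    | none => pvGo data (m + 1) rest

-- min-merge with left (earlier) preference on ties
def pvMerge : Option (Int × String) → Option (Int × String) → Option (Int × String)
  | a, none => a
  | none, some c => some c
  | some c, some c' => if c'.1 < c.1 then some c' else some c

-- pointwise effect of B's loop on the entry of one field f
def pvMix (f : String) : List (String × String) → Option (Int × String) → Option (Int × String)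
  | [], cur => cur
  | kv :: rest, cur =>
    if kv.2 = "" then pvMix f rest cur
    else
      match (PySem.Dict.mk pvReverse).get? kv.1 with
      | some q => if q.1 = f then pvMix f rest (pvMerge cur (some (q.2, kv.2))) else pvMix f rest cur
      | none => pvMix f rest cur

-- candidates of field f in data: (priority, value) of every truthy entry whose key is an alias of f
def pvCands (f : String) (data : List (String × String)) : List (Int × String) :=
  data.filterMap (fun kv =>
    if kv.2 = "" then none
    else
      match (PySem.Dict.mk pvReverse).get? kv.1 with
      | some q => if q.1 = f then some (q.2, kv.2) else none
      | none => none)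

-- the extra clay_* pairs, in data order
def pvExtras (data : List (String × String)) : List (String × String) :=
  data.filterMap (fun kv =>
    if kv.2 = "" then none
    else
      match (PySem.Dict.mk pvReverse).get? kv.1 with
      | some _ => none
      | none => some (pvClay kv.1, kv.2))

-- candidate predicate of field f with alias list L (j : Nat is the position in L)
def pvCandL (data : List (String × String)) (L : List String) (j : Nat) (v : String) : Prop :=
  ∃ k, L[j]? = some k ∧ (PySem.Dict.mk data).get? k = some v ∧ v ≠ ""

-- ---- structural lemmas ----

theorem pvA_inner_eq (data : List (String × String)) (f : String) (L : List String)
    (e : PySem.Dict String String) :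
    pvA_inner data f L e =
      match pvWOpt data L with
      | some v => e.insert f v
      | none => e := by
  induction L with
  | nil => rfl
  | cons c rest ih =>
    simp only [pvA_inner, pvWOpt]
    cases h : (PySem.Dict.mk data).get? c with
    | none => exact ih
    | some v => by_cases hv : v = "" <;> simp [hv, ih]

theorem pvWOpt_eq_go (data : List (String × String)) (L : List String) (m : Int) :
    pvWOpt data L = (pvGo data m L).map (·.2) := by
  induction L generalizing m with
  | nil => rfl
  | cons c rest ih =>
    simp only [pvWOpt, pvGo]
    cases h : (PySem.Dict.mk data).get? c with
    | none => exact ih (m + 1)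
    | some v => by_cases hv : v = "" <;> simp [hv, ih (m + 1)]

theorem pvMerge_none_left (x : Option (Int × String)) : pvMerge none x = x := by
  rcases x with _ | x <;> rfl

theorem pvMerge_assoc (a b c : Option (Int × String)) :
    pvMerge (pvMerge a b) c = pvMerge a (pvMerge b c) := by
  rcases a with _ | a
  · rw [pvMerge_none_left, pvMerge_none_left]
  rcases b with _ | b
  · rw [show pvMerge (some a) none = some a from rfl, pvMerge_none_left]
  rcases c with _ | c
  · rfl
  simp only [pvMerge]
  split_ifs <;>
    first
    | rfl
    | omega
    | (dsimp only; split_ifs <;> first | rfl | omega)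

theorem pvMix_merge (f : String) (data : List (String × String)) (cur : Option (Int × String)) :
    pvMix f data cur = pvMerge cur (pvMix f data none) := by
  induction data generalizing cur with
  | nil => cases cur <;> rfl
  | cons kv rest ih =>
    simp only [pvMix]
    by_cases h0 : kv.2 = ""
    · rw [if_pos h0, if_pos h0]; exact ih cur
    · rw [if_neg h0, if_neg h0]
      cases h : (PySem.Dict.mk pvReverse).get? kv.1 with
      | none => simp only []; exact ih cur
      | some q =>
        simp only []
        by_cases hq : q.1 = f
        · rw [if_pos hq, if_pos hq, ih (pvMerge cur (some (q.2, kv.2))),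
              ih (pvMerge none (some (q.2, kv.2)))]
          show pvMerge (pvMerge cur _) _ = _
          rw [pvMerge_assoc]
          rfl
        · rw [if_neg hq, if_neg hq]; exact ih cur

theorem pvMix_eq_foldr (f : String) (data : List (String × String)) :
    pvMix f data none = (pvCands f data).foldr (fun jv acc => pvMerge (some jv) acc) none := by
  induction data with
  | nil => rfl
  | cons kv rest ih =>
    simp only [pvMix, pvCands, List.filterMap_cons]
    by_cases h0 : kv.2 = ""
    · simpa [h0] using ih
    · simp only [h0, if_false]
      cases h : (PySem.Dict.mk pvReverse).get? kv.1 with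
      | none => simpa using ih
      | some q =>
        by_cases hq : q.1 = f
        · simp only [hq]
          rw [pvMix_merge, ih]
          rfl
        · simpa [hq] using ih

-- ---- B's loop: pointwise view of the best-dict, and the extras list ----

theorem pvB_best (data : List (String × String)) (f : String)
    (st : PySem.Dict String (Int × String) × List (String × String)) :
    ((data.foldl pvB_step st).1).get? f = pvMix f data (st.1.get? f) := by
  induction data generalizing st with
  | nil => rfl
  | cons kv rest ih =>
    rw [List.foldl_cons]
    simp only [pvMix]
    by_cases h0 : kv.2 = ""
    · rw [if_pos h0]
      have hst : pvB_step st kv = st := by simp [pvB_step, h0]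
      rw [hst]
      exact ih st
    · rw [if_neg h0]
      cases h : (PySem.Dict.mk pvReverse).get? kv.1 with
      | none =>
        have hst : pvB_step st kv = (st.1, st.2 ++ [(pvClay kv.1, kv.2)]) := by
          simp [pvB_step, h0, h]
        rw [hst, ih]
      | some q =>
        simp only []
        by_cases hq : q.1 = f
        · rw [if_pos hq]
          subst hq
          rw [ih]
          congr 1
          cases hc : st.1.get? q.1 with
          | none =>
            simp only [pvB_step, if_neg h0, h, hc, pvMerge]
            exact PySem.Dict.get?_insert_self _ _ _
          | some c =>
            simp only [pvB_step, if_neg h0, h, hc, pvMerge]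
            by_cases hlt : q.2 < c.1
            · rw [if_pos hlt, if_pos hlt]
              exact PySem.Dict.get?_insert_self _ _ _
            · rw [if_neg hlt, if_neg hlt, hc]
        · rw [if_neg hq, ih]
          congr 1
          cases hc : st.1.get? q.1 with
          | none =>
            simp only [pvB_step, if_neg h0, h, hc]
            exact PySem.Dict.get?_insert_of_ne _ _ (Ne.symm hq)
          | some c =>
            simp only [pvB_step, if_neg h0, h, hc]
            by_cases hlt : q.2 < c.1
            · rw [if_pos hlt]
              exact PySem.Dict.get?_insert_of_ne _ _ (Ne.symm hq)
            · rw [if_neg hlt]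

theorem pvB_extras (data : List (String × String))
    (st : PySem.Dict String (Int × String) × List (String × String)) :
    (data.foldl pvB_step st).2 = st.2 ++ pvExtras data := by
  induction data generalizing st with
  | nil => simp [pvExtras]
  | cons kv rest ih =>
    rw [List.foldl_cons]
    simp only [pvExtras, List.filterMap_cons]
    by_cases h0 : kv.2 = ""
    · have hst : pvB_step st kv = st := by simp [pvB_step, h0]
      rw [hst, if_pos h0]
      exact ih st
    · rw [if_neg h0]
      cases h : (PySem.Dict.mk pvReverse).get? kv.1 with
      | none =>
        have hst : pvB_step st kv = (st.1, st.2 ++ [(pvClay kv.1, kv.2)]) := by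
          simp [pvB_step, h0, h]
        rw [hst]
        simp only []
        rw [ih]
        simp [pvExtras, List.append_assoc]
      | some q =>
        have hst : (pvB_step st kv).2 = st.2 := by
          simp only [pvB_step, if_neg h0, h]
          cases hc : st.1.get? q.1 with
          | none => rfl
          | some c => by_cases hlt : q.2 < c.1 <;> simp [hlt]
        simp only []
        rw [ih, hst]
        rfl

-- ---- A's known-fields set is exactly the reverse map's key list ----

theorem pvKnown_eq :
    pvFieldMapping.foldl (fun s p => PySem.Set.update s p.2) PySem.Set.empty =
      pvReverse.map Prod.fst := by
  set_option maxRecDepth 40000 in decide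

set_option maxRecDepth 40000 in
theorem pvKnown_contains (k : String) :
    PySem.Set.contains (pvFieldMapping.foldl (fun s p => PySem.Set.update s p.2) PySem.Set.empty) k =
      ((PySem.Dict.mk pvReverse).get? k).isSome := by
  rw [pvKnown_eq]
  cases h : (PySem.Dict.mk pvReverse).get? k with
  | none =>
    have := (PySem.Dict.get?_eq_none_iff_not_mem_keys (PySem.Dict.mk pvReverse) k).mp h
    simp only [PySem.Dict.keys] at this
    simpa [PySem.Set.contains_eq_listContains] using this
  | some v =>
    have hm : k ∈ (PySem.Dict.mk pvReverse).keys :=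
      PySem.Dict.mem_keys_of_mem_items _ (PySem.Dict.mem_items_of_get?_eq_some _ h)
    simp only [PySem.Dict.keys] at hm
    simpa [PySem.Set.contains_eq_listContains] using hm

-- ---- A's second loop appends exactly the extras ----

set_option maxRecDepth 40000 in
theorem pvA_phase2 (data : List (String × String)) (e : PySem.Dict String String) :
    data.foldl
      (fun e kv =>
        if ¬ PySem.Set.contains
              (pvFieldMapping.foldl (fun s p => PySem.Set.update s p.2) PySem.Set.empty) kv.1
            ∧ kv.2 ≠ "" then e.insert (pvClay kv.1) kv.2 else e) e =
    (pvExtras data).foldl (fun e kv => e.insert kv.1 kv.2) e := by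
  induction data generalizing e with
  | nil => rfl
  | cons kv rest ih =>
    rw [List.foldl_cons]
    simp only [pvExtras, List.filterMap_cons]
    by_cases h0 : kv.2 = ""
    · rw [if_pos h0]
      have : ¬ (¬ PySem.Set.contains
          (pvFieldMapping.foldl (fun s p => PySem.Set.update s p.2) PySem.Set.empty) kv.1
          ∧ kv.2 ≠ "") := by simp [h0]
      rw [if_neg this]
      exact ih e
    · rw [if_neg h0]
      cases h : (PySem.Dict.mk pvReverse).get? kv.1 with
      | none =>
        have hcond : (¬ PySem.Set.contains
            (pvFieldMapping.foldl (fun s p => PySem.Set.update s p.2) PySem.Set.empty) kv.1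
            ∧ kv.2 ≠ "") := by
          constructor
          · rw [pvKnown_contains, h]; simp
          · exact h0
        rw [if_pos hcond]
        simp only [List.foldl_cons]
        exact ih _
      | some q =>
        have hcond : ¬ (¬ PySem.Set.contains
            (pvFieldMapping.foldl (fun s p => PySem.Set.update s p.2) PySem.Set.empty) kv.1
            ∧ kv.2 ≠ "") := by
          rw [pvKnown_contains, h]
          simp
        rw [if_neg hcond]
        simp only []
        exact ih e

-- ---- the reverse map, characterized against field_mapping ----

theorem pvAssoc_fun {α β : Type} (l : List (α × β)) (h : (l.map Prod.fst).Nodup)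
    {a : α} {b b' : β} (h1 : (a, b) ∈ l) (h2 : (a, b') ∈ l) : b = b' := by
  induction l with
  | nil => cases h1
  | cons hd tl ih =>
    simp only [List.map_cons, List.nodup_cons] at h
    rcases List.mem_cons.mp h1 with m1 | m1
    · rcases List.mem_cons.mp h2 with m2 | m2
      · rw [← m1] at m2; injection m2 with _ hb; exact hb.symm
      · exfalso
        apply h.1
        rw [← m1]
        exact List.mem_map.mpr ⟨(a, b'), m2, rfl⟩
    · rcases List.mem_cons.mp h2 with m2 | m2
      · exfalso
        apply h.1
        rw [← m2]
        exact List.mem_map.mpr ⟨(a, b), m1, rfl⟩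
      · exact ih h.2 m1 m2

set_option maxRecDepth 40000 in
theorem pvRev_nodupKeys : ((PySem.Dict.mk pvReverse).keys).Nodup := by decide

set_option maxRecDepth 40000 in
theorem pvFM_nodupFst : (pvFieldMapping.map Prod.fst).Nodup := by decide

theorem pvRev_mem (k : String) (f : String) (j : Int) :
    (k, (f, j)) ∈ pvReverse ↔
      ∃ L, (f, L) ∈ pvFieldMapping ∧ ∃ jn : Nat, j = (jn : Int) ∧ L[jn]? = some k := by
  constructor
  · intro h
    simp only [pvReverse, List.mem_flatMap, List.mem_map] at h
    obtain ⟨p, hp, q, hq, heq⟩ := h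
    have hk : q.2 = k := congrArg Prod.fst heq
    have hf : p.1 = f := congrArg (fun r => r.2.1) heq
    have hj : q.1 = j := congrArg (fun r => r.2.2) heq
    obtain ⟨kn, hkn, hqq⟩ := (PySem.List.mem_enumerate_iff _ _ _).mp hq
    refine ⟨p.2, by rw [← hf]; simpa using hp, kn, ?_, ?_⟩
    · rw [← hj, hqq]; simp
    · rw [← hk, hqq]
      simp [List.getElem?_eq_getElem hkn]
  · rintro ⟨L, hL, jn, hj, hval⟩
    have hjn : jn < L.length := (List.getElem?_eq_some_iff.mp hval).1
    have hk : L[jn] = k := by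
      have := List.getElem?_eq_getElem hjn
      rw [hval] at this
      exact (Option.some.injEq _ _).mp this.symm
    simp only [pvReverse, List.mem_flatMap, List.mem_map]
    refine ⟨(f, L), hL, (jn, k), ?_, by simp [hj]⟩
    rw [PySem.List.mem_enumerate_iff]
    exact ⟨jn, hjn, by simp [hk]⟩

theorem pvH1 (f : String) (L : List String) (hfL : (f, L) ∈ pvFieldMapping)
    (k : String) (j : Int) :
    (PySem.Dict.mk pvReverse).get? k = some (f, j) ↔
      ∃ jn : Nat, j = (jn : Int) ∧ L[jn]? = some k := by
  constructor
  · intro h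
    have hmem := PySem.Dict.mem_items_of_get?_eq_some _ h
    obtain ⟨L', hL', jn, hj, hval⟩ := (pvRev_mem k f j).mp hmem
    have : L' = L := pvAssoc_fun pvFieldMapping pvFM_nodupFst hL' hfL
    exact ⟨jn, hj, this ▸ hval⟩
  · rintro ⟨jn, hj, hval⟩
    have hmem : (k, (f, j)) ∈ pvReverse := (pvRev_mem k f j).mpr ⟨L, hfL, jn, hj, hval⟩
    exact (PySem.Dict.get?_eq_some_iff_mem_items _ _ _ pvRev_nodupKeys).mpr hmem

-- ---- membership in the candidate list ----

theorem pvData_get (data : List (String × String)) (hnd : (data.map Prod.fst).Nodup)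
    (k v) : (PySem.Dict.mk data).get? k = some v ↔ (k, v) ∈ data := by
  have hk : ((PySem.Dict.mk data).keys).Nodup := by
    simpa [PySem.Dict.keys] using hnd
  exact PySem.Dict.get?_eq_some_iff_mem_items _ _ _ hk

theorem pvCands_mem (data : List (String × String)) (f : String) (L : List String)
    (hfL : (f, L) ∈ pvFieldMapping) (hnd : (data.map Prod.fst).Nodup) (x : Int × String) :
    x ∈ pvCands f data ↔ ∃ jn : Nat, x.1 = (jn : Int) ∧ pvCandL data L jn x.2 := by
  constructor
  · intro hx
    obtain ⟨kv, hkv, hval⟩ := List.mem_filterMap.mp hx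
    by_cases h0 : kv.2 = ""
    · rw [if_pos h0] at hval; cases hval
    · rw [if_neg h0] at hval
      cases h : (PySem.Dict.mk pvReverse).get? kv.1 with
      | none => rw [h] at hval; cases hval
      | some q =>
        rw [h] at hval
        dsimp only at hval
        by_cases hq : q.1 = f
        · rw [if_pos hq] at hval
          have hx2 : (q.2, kv.2) = x := Option.some.inj hval
          subst hx2
          have hqf : (PySem.Dict.mk pvReverse).get? kv.1 = some (f, q.2) := by
            rw [h, ← hq]
          obtain ⟨jn, hj, hLk⟩ := (pvH1 f L hfL kv.1 q.2).mp hqf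
          exact ⟨jn, hj, kv.1, hLk, (pvData_get data hnd _ _).mpr (by simpa using hkv), h0⟩
        · rw [if_neg hq] at hval; cases hval
  · rintro ⟨jn, hj, k, hLk, hget, hne⟩
    apply List.mem_filterMap.mpr
    refine ⟨(k, x.2), (pvData_get data hnd _ _).mp hget, ?_⟩
    have hrev : (PySem.Dict.mk pvReverse).get? k = some (f, (jn : Int)) :=
      (pvH1 f L hfL k jn).mpr ⟨jn, rfl, hLk⟩
    have hj' : (jn : Int) = x.1 := hj.symm
    simp only [if_neg hne, hrev]
    simp [← hj]

-- ---- the foldr of pvMerge is the earliest minimum ----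

theorem pvFoldMin_none (l : List (Int × String)) :
    l.foldr (fun jv acc => pvMerge (some jv) acc) none = none → l = [] := by
  cases l with
  | nil => intro; rfl
  | cons hd tl =>
    intro h
    exfalso
    simp only [List.foldr_cons] at h
    cases htl : tl.foldr (fun jv acc => pvMerge (some jv) acc) none with
    | none => rw [htl] at h; simp [pvMerge] at h
    | some c => rw [htl] at h; simp only [pvMerge] at h; split_ifs at h

theorem pvFoldMin_some (l : List (Int × String)) (c : Int × String)
    (h : l.foldr (fun jv acc => pvMerge (some jv) acc) none = some c) :
    c ∈ l ∧ ∀ x ∈ l, c.1 ≤ x.1 := by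
  induction l generalizing c with
  | nil => simp at h
  | cons hd tl ih =>
    simp only [List.foldr_cons] at h
    cases htl : tl.foldr (fun jv acc => pvMerge (some jv) acc) none with
    | none =>
      rw [htl] at h
      have : tl = [] := pvFoldMin_none tl htl
      subst this
      simp only [pvMerge] at h
      cases h
      simp
    | some c' =>
      rw [htl] at h
      obtain ⟨hmem, hmin⟩ := ih c' htl
      simp only [pvMerge] at h
      split_ifs at h with hlt
      · cases h
        exact ⟨List.mem_cons_of_mem _ hmem, by
          intro x hx
          rcases List.mem_cons.mp hx with rfl | hx
          · omega
          · exact hmin x hx⟩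
      · cases h
        exact ⟨List.mem_cons_self, by
          intro x hx
          rcases List.mem_cons.mp hx with rfl | hx
          · omega
          · have := hmin x hx; omega⟩

-- ---- the alias scan pvGo is the earliest candidate ----

theorem pvCandL_cons (data : List (String × String)) (c : String) (rest : List String)
    (j : Nat) (v : String) :
    pvCandL data (c :: rest) (j + 1) v ↔ pvCandL data rest j v := by
  simp [pvCandL]

theorem pvGo_none (data : List (String × String)) (L : List String) (m : Int)
    (h : pvGo data m L = none) : ∀ j v, ¬ pvCandL data L j v := by
  induction L generalizing m with
  | nil => intro j v hc; obtain ⟨k, hk, -⟩ := hc; simp at hk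
  | cons c rest ih =>
    intro j v hc
    simp only [pvGo] at h
    cases hget : (PySem.Dict.mk data).get? c with
    | some w =>
      rw [hget] at h
      dsimp only at h
      by_cases hw : w = ""
      · rw [if_neg (by simpa using hw)] at h
        cases j with
        | zero =>
          obtain ⟨k, hk, hgk, hne⟩ := hc
          simp only [List.getElem?_cons_zero] at hk
          cases hk
          rw [hget] at hgk
          cases hgk
          exact hne hw
        | succ j => exact ih (m + 1) h j v ((pvCandL_cons data c rest j v).mp hc)
      · rw [if_pos (by simpa using hw)] at h; cases h
    | none =>
      rw [hget] at h
      dsimp only at h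
      cases j with
      | zero =>
        obtain ⟨k, hk, hgk, hne⟩ := hc
        simp only [List.getElem?_cons_zero] at hk
        cases hk
        rw [hget] at hgk
        cases hgk
      | succ j => exact ih (m + 1) h j v ((pvCandL_cons data c rest j v).mp hc)

theorem pvGo_some (data : List (String × String)) (L : List String) (m : Int)
    (n : Int) (v : String) (h : pvGo data m L = some (n, v)) :
    ∃ jn : Nat, n = m + jn ∧ pvCandL data L jn v ∧
      ∀ (i : Nat) (w : String), pvCandL data L i w → jn ≤ i := by
  induction L generalizing m with
  | nil => simp [pvGo] at h
  | cons c rest ih =>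
    simp only [pvGo] at h
    cases hget : (PySem.Dict.mk data).get? c with
    | some w =>
      rw [hget] at h
      dsimp only at h
      by_cases hw : w = ""
      · rw [if_neg (by simpa using hw)] at h
        obtain ⟨jn, hn, hc, hmin⟩ := ih (m + 1) h
        refine ⟨jn + 1, by push_cast; omega, (pvCandL_cons data c rest jn v).mpr hc, ?_⟩
        intro i u hi
        cases i with
        | zero =>
          obtain ⟨k, hk, hgk, hne⟩ := hi
          simp only [List.getElem?_cons_zero] at hk
          cases hk
          rw [hget] at hgk
          cases hgk
          exact absurd hw hne
        | succ i =>
          have := hmin i u ((pvCandL_cons data c rest i u).mp hi)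
          omega
      · rw [if_pos (by simpa using hw)] at h
        obtain ⟨rfl, rfl⟩ : m = n ∧ w = v := by
          have := Option.some.inj h
          exact ⟨congrArg Prod.fst this, congrArg Prod.snd this⟩
        exact ⟨0, by omega, ⟨c, rfl, hget, by simpa using hw⟩, fun i w _ => Nat.zero_le i⟩
    | none =>
      rw [hget] at h
      dsimp only at h
      obtain ⟨jn, hn, hc, hmin⟩ := ih (m + 1) h
      refine ⟨jn + 1, by push_cast; omega, (pvCandL_cons data c rest jn v).mpr hc, ?_⟩
      intro i u hi
      cases i with
      | zero =>
        obtain ⟨k, hk, hgk, hne⟩ := hi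
        simp only [List.getElem?_cons_zero] at hk
        cases hk
        rw [hget] at hgk
        cases hgk
      | succ i =>
        have := hmin i u ((pvCandL_cons data c rest i u).mp hi)
        omega

-- ---- CORE: B's per-field winner equals A's alias scan ----

theorem pvCore (data : List (String × String)) (f : String) (L : List String)
    (hfL : (f, L) ∈ pvFieldMapping) (hnd : (data.map Prod.fst).Nodup) :
    ((data.foldl pvB_step (PySem.Dict.empty, [])).1).get? f = pvGo data 0 L := by
  rw [pvB_best]
  have he : (PySem.Dict.empty : PySem.Dict String (Int × String)).get? f = none := by
    simp [pysem]
  rw [he, pvMix_eq_foldr]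
  cases hA : pvGo data 0 L with
  | none =>
    cases hB : (pvCands f data).foldr (fun jv acc => pvMerge (some jv) acc) none with
    | none => rfl
    | some c =>
      exfalso
      obtain ⟨hmem, -⟩ := pvFoldMin_some _ _ hB
      obtain ⟨jn, -, hc⟩ := (pvCands_mem data f L hfL hnd c).mp hmem
      exact pvGo_none data L 0 hA jn c.2 hc
  | some p =>
    obtain ⟨n, v⟩ := p
    obtain ⟨jn, hn, hc, hmin⟩ := pvGo_some data L 0 n v hA
    have hx : ((jn : Int), v) ∈ pvCands f data :=
      (pvCands_mem data f L hfL hnd ((jn : Int), v)).mpr ⟨jn, rfl, hc⟩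
    cases hB : (pvCands f data).foldr (fun jv acc => pvMerge (some jv) acc) none with
    | none =>
      exfalso
      have := pvFoldMin_none _ hB
      rw [this] at hx
      cases hx
    | some c =>
      obtain ⟨hmem, hminB⟩ := pvFoldMin_some _ _ hB
      obtain ⟨jm, hjm, hcm⟩ := (pvCands_mem data f L hfL hnd c).mp hmem
      have h1 : jn ≤ jm := hmin jm c.2 hcm
      have h2 : (jm : Int) ≤ (jn : Int) := by
        have := hminB _ hx
        rw [hjm] at this
        exact this
      have hjj : jm = jn := by omega
      have hveq : c.2 = v := by
        obtain ⟨k1, hk1, hg1, -⟩ := hcm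
        obtain ⟨k2, hk2, hg2, -⟩ := hc
        rw [hjj] at hk1
        rw [hk1] at hk2
        cases hk2
        rw [hg1] at hg2
        cases hg2
        rfl
      have : c = (n, v) := by
        have : c = (c.1, c.2) := rfl
        rw [this, hjm, hjj, hveq, hn]
        simp
      rw [this]

-- ---- assembling the two programs ----

theorem pvPhase1_eq (data : List (String × String)) (hnd : (data.map Prod.fst).Nodup) :
    pvFieldMapping.foldl (fun e p => pvA_inner data p.1 p.2 e) PySem.Dict.empty =
      pvFieldMapping.foldl
        (fun e p =>
          match ((data.foldl pvB_step (PySem.Dict.empty, [])).1).get? p.1 with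
          | some c => e.insert p.1 c.2
          | none => e) PySem.Dict.empty := by
  apply PySem.List.foldl_congr_mem
  intro acc p hp
  rw [pvA_inner_eq]
  have hfL : (p.1, p.2) ∈ pvFieldMapping := by simpa using hp
  rw [pvCore data p.1 p.2 hfL hnd, pvWOpt_eq_go data p.2 0]
  cases pvGo data 0 p.2 <;> rfl

-- ===== VERDICT (by name: the statement is the Claim_ definition above) =====

theorem parse_enrichment_data_spec : Claim_equal_parse_enrichment_data := by
  intro data _ hpre
  have hnd : (data.map Prod.fst).Nodup := hpre
  show parse_enrichment_data data = parse_enrichment_data_alt data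
  unfold parse_enrichment_data parse_enrichment_data_alt
  show (data.foldl
      (fun e kv =>
        if ¬ PySem.Set.contains
              (pvFieldMapping.foldl (fun s p => PySem.Set.update s p.2) PySem.Set.empty) kv.1
            ∧ kv.2 ≠ "" then e.insert (pvClay kv.1) kv.2 else e)
      (pvFieldMapping.foldl (fun e p => pvA_inner data p.1 p.2 e) PySem.Dict.empty)).items =
    (PySem.Dict.update
      (pvFieldMapping.foldl
        (fun e p =>
          match ((data.foldl pvB_step (PySem.Dict.empty, [])).1).get? p.1 with
          | some c => e.insert p.1 c.2
          | none => e) PySem.Dict.empty)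
      ((data.foldl pvB_step (PySem.Dict.empty, [])).2)).items
  rw [pvA_phase2, pvPhase1_eq data hnd, pvB_extras, List.nil_append]
  rfl
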